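-- pv_equiv track=rewrite | github.com/spikems/tumnus | tumnus/preprocess/alongTheWay_cut.py | wordInDict
-- ===== SOURCE A (Python) =====
-- def wordInDict(sentence,lists,label):
--
--     special_word = []
--     num = 0
--     for i in lists :
--         if i in sentence:
--             special_word.append('%s_%s'%(label,num))
--             num += 1
--
--     return ' '.join(special_word)
-- ===== SOURCE B (Python) =====
-- def wordInDict(sentence, lists, label):
--     # Count matches first, then generate the numbered tags in one shot.
--     n = sum(1 for i in lists if sentence.find(i) != -1)
--     return ' '.join('%s_%s' % (label, k) for k in range(n))
-- ===== Notes on version B (the rewrite author's own statement) =====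
-- stated objective: simpler
-- what changed: A builds the tag list inside the scan, appending label_num and incrementing a counter per match; B first counts the matching items in one pass (using str.find instead of the in-operator) and then generates the tags label_0..label_{n-1} directly from range(n).
import Mathlib
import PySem

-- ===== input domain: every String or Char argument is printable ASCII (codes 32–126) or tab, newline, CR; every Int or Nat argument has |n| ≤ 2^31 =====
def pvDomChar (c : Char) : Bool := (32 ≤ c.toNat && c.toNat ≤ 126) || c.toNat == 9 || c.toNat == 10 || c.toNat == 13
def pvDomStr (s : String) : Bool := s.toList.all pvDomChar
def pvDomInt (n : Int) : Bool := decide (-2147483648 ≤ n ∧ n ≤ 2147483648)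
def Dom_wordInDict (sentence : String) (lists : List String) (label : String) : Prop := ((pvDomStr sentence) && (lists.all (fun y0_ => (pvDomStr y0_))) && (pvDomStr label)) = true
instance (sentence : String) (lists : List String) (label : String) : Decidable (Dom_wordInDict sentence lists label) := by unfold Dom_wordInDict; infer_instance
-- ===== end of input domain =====

-- B replaces A's single loop that builds the tag list while counting by a count-then-generate
-- decomposition: count the matching items once, then emit label_0 … label_{n-1} directly (simpler).

-- ===== PORT A =====
-- A: one loop over lists, appending '%s_%s' % (label, num) and incrementing num on each match.
def wordInDict (sentence : String) (lists : List String) (label : String) : String :=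
  let r := lists.foldl
    (fun (acc : List String × Int) i =>
      if PySem.Str.isIn i sentence then
        (acc.1 ++ [label ++ "_" ++ PySem.Int.toStr acc.2], acc.2 + 1)
      else acc)
    ([], 0)
  PySem.Str.join " " r.1

-- ===== PORT B =====
-- '%s_%s' % (label, k) for a Nat k from range(n)
def pvTag (label : String) (k : Nat) : String := label ++ "_" ++ PySem.Int.toStr (k : Int)

-- B: n = sum(1 for i in lists if sentence.find(i) != -1); join of the tags for range(n).
def wordInDict_alt (sentence : String) (lists : List String) (label : String) : String :=
  let n : Nat := lists.countP (fun i => PySem.Str.find sentence i != -1)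
  PySem.Str.join " " ((List.range n).map (pvTag label))

-- ===== PRECONDITION & SPEC =====
def Spec_wordInDict (sentence : String) (lists : List String) (label : String) (out : String) : Prop := out = wordInDict_alt sentence lists label
instance (sentence : String) (lists : List String) (label : String) (out : String) : Decidable (Spec_wordInDict sentence lists label out) := by unfold Spec_wordInDict; infer_instance

-- ===== CLAIM (what is proved, stated in full; the proofs are below) =====
def Claim_equal_wordInDict : Prop := ∀ (sentence : String) (lists : List String) (label : String), Dom_wordInDict sentence lists label → Spec_wordInDict sentence lists label (wordInDict sentence lists label)

-- ===== LEMMAS AND PROOFS =====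

-- Loop invariant for A: starting from the first m tags and counter m, the loop ends with the
-- tags for m + (number of matches) entries.
lemma wordInDict_loop_inv (sentence label : String) (l : List String) (m : Nat) :
    (l.foldl
      (fun (acc : List String × Int) i =>
        if PySem.Str.isIn i sentence then
          (acc.1 ++ [label ++ "_" ++ PySem.Int.toStr acc.2], acc.2 + 1)
        else acc)
      ((List.range m).map (pvTag label), (m : Int))).1
    = (List.range (m + l.countP (fun i => PySem.Str.isIn i sentence))).map (pvTag label) := by
  induction l generalizing m with
  | nil => simp
  | cons h t ih =>
    by_cases hm : PySem.Str.isIn h sentence = true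
    · rw [List.foldl_cons, if_pos hm]
      have h1 : (List.range m).map (pvTag label) ++ [label ++ "_" ++ PySem.Int.toStr (m : Int)]
          = (List.range (m + 1)).map (pvTag label) := by
        simp [List.range_succ, pvTag]
      have h2 : ((m : Int) + 1) = ((m + 1 : Nat) : Int) := by push_cast; ring
      rw [h1, h2, ih (m + 1)]
      have h3 : m + 1 + t.countP (fun i => PySem.Str.isIn i sentence)
          = m + (h :: t).countP (fun i => PySem.Str.isIn i sentence) := by
        have hm' : PySem.Chars.isIn h.toList sentence.toList = true := by simpa using hm
        simp [hm']; try omega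
      rw [h3]
    · rw [List.foldl_cons, if_neg hm, ih m]
      have hm' : ¬ PySem.Chars.isIn h.toList sentence.toList = true := by simpa using hm
      simp [hm']; try omega

-- The two per-element tests agree: 'i in sentence' ↔ sentence.find(i) != -1.
lemma test_agree (sentence i : String) :
    PySem.Str.isIn i sentence = (PySem.Str.find sentence i != -1) := by
  rw [Bool.eq_iff_iff]
  constructor
  · intro hb
    simpa [bne_iff_ne] using
      (PySem.Str.find_ne_neg_one_iff sentence i).mpr ((PySem.Str.isIn_iff_infix i sentence).mp hb)
  · intro hb
    exact (PySem.Str.isIn_iff_infix i sentence).mpr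
      ((PySem.Str.find_ne_neg_one_iff sentence i).mp (by simpa [bne_iff_ne] using hb))

-- ===== VERDICT (by name: the statement is the Claim_ definition above) =====
theorem wordInDict_spec : Claim_equal_wordInDict := by
  intro sentence lists label _
  show wordInDict sentence lists label = wordInDict_alt sentence lists label
  unfold wordInDict wordInDict_alt
  have h0 := wordInDict_loop_inv sentence label lists 0
  simp only [List.range_zero, List.map_nil, Nat.cast_zero, Nat.zero_add] at h0
  have hc : lists.countP (fun i => PySem.Str.find sentence i != -1)
      = lists.countP (fun i => PySem.Str.isIn i sentence) :=
    List.countP_congr (fun i _ => by rw [test_agree sentence i])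
  simp only [h0, hc]
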